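-- pv_equiv track=rewrite | github.com/hyunjun/practice | python/problem-ETC/maximum_points_you_can_obtain_from_cards.py | maxScore1
-- ===== SOURCE A (Python) =====
-- from typing import List
--
-- def maxScore1(cardPoints: List[int], k: int) -> int:
--     if cardPoints is None or not (1 <= len(cardPoints) <= 10 ** 5) or not (1 <= k <= len(cardPoints)):
--         return 0
--
--     if len(cardPoints) == k:
--         return sum(cardPoints)
--
--     score = 0
--     for l in range(k, -1, -1):
--         r = k - l
--         score = max(score, sum(cardPoints[:l]) + sum(cardPoints[len(cardPoints) - r:]))
--     return score
-- ===== SOURCE B (Python) =====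
-- from typing import List
--
-- def maxScore1(cardPoints: List[int], k: int) -> int:
--     if cardPoints is None or not (1 <= len(cardPoints) <= 10 ** 5) or not (1 <= k <= len(cardPoints)):
--         return 0
--
--     n = len(cardPoints)
--     if n == k:
--         return sum(cardPoints)
--
--     # sliding window: cur = sum of l left cards + r right cards, updated in O(1)
--     cur = sum(cardPoints[:k])
--     best = max(0, cur)
--     for r in range(1, k + 1):
--         cur += cardPoints[n - r] - cardPoints[k - r]
--         best = max(best, cur)
--     return best
-- ===== Notes on version B (the rewrite author's own statement) =====
-- stated objective: alternative
-- what changed: Replaces A's loop that re-sums the prefix and suffix slices from scratch for every split with a sliding window that updates one running window sum in O(1) per step.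
import Mathlib
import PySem

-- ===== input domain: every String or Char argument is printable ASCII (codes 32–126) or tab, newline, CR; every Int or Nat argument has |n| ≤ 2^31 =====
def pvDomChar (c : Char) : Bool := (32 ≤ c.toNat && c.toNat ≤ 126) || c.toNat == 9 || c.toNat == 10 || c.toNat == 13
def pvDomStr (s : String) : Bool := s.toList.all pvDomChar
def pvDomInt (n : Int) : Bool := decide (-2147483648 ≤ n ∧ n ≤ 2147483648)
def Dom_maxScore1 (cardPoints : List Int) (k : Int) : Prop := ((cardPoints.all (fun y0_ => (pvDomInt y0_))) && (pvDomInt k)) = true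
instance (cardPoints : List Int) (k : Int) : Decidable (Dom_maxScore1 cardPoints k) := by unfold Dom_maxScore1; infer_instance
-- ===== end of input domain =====

-- B replaces A's per-split re-summation of prefix/suffix slices with a sliding window
-- that updates one running sum per step (objective: alternative algorithm).

-- ===== PORT A =====
def maxScore1 (cardPoints : List Int) (k : Int) : Int :=
  if ¬ (1 ≤ (cardPoints.length : Int) ∧ (cardPoints.length : Int) ≤ 10 ^ 5) ∨
     ¬ (1 ≤ k ∧ k ≤ (cardPoints.length : Int)) then 0
  else if (cardPoints.length : Int) = k then cardPoints.sum
  else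
    (PySem.List.pyRange k (-1) (-1)).foldl
      (fun score l =>
        max score ((PySem.List.slice cardPoints none (some l)).sum +
          (PySem.List.slice cardPoints (some ((cardPoints.length : Int) - (k - l))) none).sum)) 0

-- ===== PORT B =====
def maxScore1_alt (cardPoints : List Int) (k : Int) : Int :=
  if ¬ (1 ≤ (cardPoints.length : Int) ∧ (cardPoints.length : Int) ≤ 10 ^ 5) ∨
     ¬ (1 ≤ k ∧ k ≤ (cardPoints.length : Int)) then 0
  else if (cardPoints.length : Int) = k then cardPoints.sum
  else
    (((PySem.List.pyRange 1 (k + 1) 1).foldl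
      (fun (p : Int × Int) r =>
        (max p.1 (p.2 + PySem.List.pyGetD cardPoints ((cardPoints.length : Int) - r) 0
                      - PySem.List.pyGetD cardPoints (k - r) 0),
         p.2 + PySem.List.pyGetD cardPoints ((cardPoints.length : Int) - r) 0
             - PySem.List.pyGetD cardPoints (k - r) 0))
      (max 0 ((PySem.List.slice cardPoints none (some k)).sum),
       (PySem.List.slice cardPoints none (some k)).sum))).1

-- ===== PRECONDITION & SPEC =====
def Spec_maxScore1 (cardPoints : List Int) (k : Int) (out : Int) : Prop := out = maxScore1_alt cardPoints k
instance (cardPoints : List Int) (k : Int) (out : Int) : Decidable (Spec_maxScore1 cardPoints k out) := by unfold Spec_maxScore1; infer_instance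

-- ===== CLAIM (what is proved, stated in full; the proofs are below) =====
def Claim_equal_maxScore1 : Prop := ∀ (cardPoints : List Int) (k : Int), Dom_maxScore1 cardPoints k → Spec_maxScore1 cardPoints k (maxScore1 cardPoints k)

-- ===== LEMMAS AND PROOFS =====

-- The score of taking (kn - r) cards from the front and r from the back.
def pvSplit (xs : List Int) (kn r : Nat) : Int :=
  (xs.take (kn - r)).sum + (xs.drop (xs.length - r)).sum

theorem pvSplit_zero (xs : List Int) (kn : Nat) :
    pvSplit xs kn 0 = (xs.take kn).sum := by
  simp [pvSplit]

theorem pvSum_take_succ (xs : List Int) (a : Nat) (h : a < xs.length) :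
    (xs.take (a + 1)).sum = (xs.take a).sum + xs[a] := by
  rw [List.take_add_one, List.getElem?_eq_getElem h]
  rw [Option.toList_some, List.sum_append, List.sum_cons, List.sum_nil]
  omega

theorem pvSplit_succ (xs : List Int) (kn j : Nat) (hj : j < kn) (hk : kn < xs.length) :
    pvSplit xs kn (j + 1)
      = pvSplit xs kn j + xs[xs.length - (j + 1)]'(by omega)
          - xs[kn - (j + 1)]'(by omega) := by
  unfold pvSplit
  have h1 : kn - j = (kn - (j + 1)) + 1 := by omega
  have h2 : xs.length - j = (xs.length - (j + 1)) + 1 := by omega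
  rw [h1, h2, pvSum_take_succ xs (kn - (j + 1)) (by omega),
      List.drop_eq_getElem_cons (by omega : xs.length - (j + 1) < xs.length),
      List.sum_cons]
  omega

-- The running max of A, over splits 0..m-1.
def pvAmax (xs : List Int) (kn m : Nat) : Int :=
  (List.range m).foldl (fun s j => max s (pvSplit xs kn j)) 0

-- B's fold over the first m steps carries (pvAmax … (m+1), pvSplit … m).
theorem pvB_fold (xs : List Int) (kn : Nat) (hk : kn < xs.length) :
    ∀ m, m ≤ kn →
    (List.range m).foldl
       (fun (p : Int × Int) (j : Nat) =>
          (max p.1 (p.2 + PySem.List.pyGetD xs ((xs.length : Int) - (1 + (j : Int))) 0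
                        - PySem.List.pyGetD xs ((kn : Int) - (1 + (j : Int))) 0),
           p.2 + PySem.List.pyGetD xs ((xs.length : Int) - (1 + (j : Int))) 0
               - PySem.List.pyGetD xs ((kn : Int) - (1 + (j : Int))) 0))
       (max 0 ((xs.take kn).sum), (xs.take kn).sum)
    = (pvAmax xs kn (m + 1), pvSplit xs kn m) := by
  intro m
  induction m with
  | zero => intro _; simp [pvAmax, pvSplit_zero]
  | succ m ih =>
    intro hm
    rw [List.range_succ, List.foldl_append, ih (by omega)]
    simp only [List.foldl_cons, List.foldl_nil]
    have e1 : (xs.length : Int) - (1 + (m : Int)) = ((xs.length - (m + 1) : Nat) : Int) := by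
      push_cast [Nat.cast_sub (by omega : m + 1 ≤ xs.length)]; ring
    have e2 : ((kn : Int)) - (1 + (m : Int)) = ((kn - (m + 1) : Nat) : Int) := by
      push_cast [Nat.cast_sub (by omega : m + 1 ≤ kn)]; ring
    rw [e1, e2,
        PySem.List.pyGetD_eq_getElem xs 0 (by positivity) (by exact_mod_cast (by omega : xs.length - (m + 1) < xs.length)),
        PySem.List.pyGetD_eq_getElem xs 0 (by positivity) (by exact_mod_cast (by omega : kn - (m + 1) < xs.length))]
    simp only [Int.toNat_natCast]
    have hc : pvSplit xs kn m + xs[xs.length - (m + 1)]'(by omega) - xs[kn - (m + 1)]'(by omega)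
        = pvSplit xs kn (m + 1) := (pvSplit_succ xs kn m (by omega) hk).symm
    rw [hc]
    refine Prod.ext ?_ rfl
    rw [pvAmax, pvAmax, List.range_succ (n := m + 1), List.foldl_append]
    simp

-- A's countdown fold equals the running max over splits 0..kn.
theorem pvA_fold (xs : List Int) (kn : Nat) (hk : kn < xs.length) :
    (PySem.List.pyRange (kn : Int) (-1) (-1)).foldl
      (fun score l =>
        max score ((PySem.List.slice xs none (some l)).sum +
          (PySem.List.slice xs (some ((xs.length : Int) - ((kn : Int) - l))) none).sum)) 0
    = pvAmax xs kn (kn + 1) := by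
  rw [PySem.List.pyRange_neg_one, List.foldl_map]
  have hlen : ((kn : Int) - (-1)).toNat = kn + 1 := by omega
  rw [hlen, pvAmax]
  apply PySem.List.foldl_congr_mem
  intro acc j hj
  have hjk : j ≤ kn := by
    have := List.mem_range.mp hj; omega
  have e1 : (kn : Int) - (j : Int) = ((kn - j : Nat) : Int) := by
    push_cast [Nat.cast_sub hjk]; ring
  have e2 : (xs.length : Int) - (j : Int) = ((xs.length - j : Nat) : Int) := by
    push_cast [Nat.cast_sub (by omega : j ≤ xs.length)]; ring
  rw [show ((kn : Int) - ((kn : Int) - (j : Int))) = (j : Int) by ring]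
  rw [e1, e2, PySem.List.slice_to xs (by positivity), PySem.List.slice_from xs (by positivity)]
  simp [pvSplit]

-- ===== VERDICT (by name: the statement is the Claim_ definition above) =====
theorem maxScore1_spec : Claim_equal_maxScore1 := by
  intro xs k _
  unfold Spec_maxScore1 maxScore1 maxScore1_alt
  by_cases hg : ¬ (1 ≤ (xs.length : Int) ∧ (xs.length : Int) ≤ 10 ^ 5) ∨
      ¬ (1 ≤ k ∧ k ≤ (xs.length : Int))
  · rw [if_pos hg, if_pos hg]
  · rw [if_neg hg, if_neg hg]
    by_cases heq : (xs.length : Int) = k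
    · rw [if_pos heq, if_pos heq]
    · rw [if_neg heq, if_neg heq]
      push Not at hg
      obtain ⟨⟨hl1, hl2⟩, hk1, hk2⟩ := hg
      obtain ⟨kn, rfl⟩ : ∃ kn : Nat, k = (kn : Int) := ⟨k.toNat, by omega⟩
      have hklt : kn < xs.length := by omega
      rw [pvA_fold xs kn hklt]
      rw [PySem.List.pyRange_one, List.foldl_map,
          show ((kn : Int) + 1 - 1) = ((kn : Nat) : Int) by ring, Int.toNat_natCast,
          PySem.List.slice_to xs (by positivity : (0 : Int) ≤ (kn : Int)), Int.toNat_natCast,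
          pvB_fold xs kn hklt kn (le_refl kn)]
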